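-- pv_equiv track=rewrite | github.com/UNR-RoboticsResearchLab/Tangrams | vidTest.py | getLowerRight
-- ===== SOURCE A (Python) =====
-- def getLowerRight(cont):
--     sums = []
--     for pt in cont:
--         sums.append(sum(pt[0]))
--     maxVal = max(sums)
--     for pt in cont:
--         if sum(pt[0]) == maxVal:
--             return pt[0]
--     return None
-- ===== SOURCE B (Python) =====
-- def getLowerRight(cont):
--     return max(cont, key=lambda pt: sum(pt[0]))[0]
-- ===== Notes on version B (the rewrite author's own statement) =====
-- stated objective: idiomatic
-- what changed: Replaces the two-pass approach (build a sums list, take its max, rescan for the first matching point) with a single selection pass using max(cont, key=...), which returns the first point attaining the maximal coordinate sum.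
import Mathlib
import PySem

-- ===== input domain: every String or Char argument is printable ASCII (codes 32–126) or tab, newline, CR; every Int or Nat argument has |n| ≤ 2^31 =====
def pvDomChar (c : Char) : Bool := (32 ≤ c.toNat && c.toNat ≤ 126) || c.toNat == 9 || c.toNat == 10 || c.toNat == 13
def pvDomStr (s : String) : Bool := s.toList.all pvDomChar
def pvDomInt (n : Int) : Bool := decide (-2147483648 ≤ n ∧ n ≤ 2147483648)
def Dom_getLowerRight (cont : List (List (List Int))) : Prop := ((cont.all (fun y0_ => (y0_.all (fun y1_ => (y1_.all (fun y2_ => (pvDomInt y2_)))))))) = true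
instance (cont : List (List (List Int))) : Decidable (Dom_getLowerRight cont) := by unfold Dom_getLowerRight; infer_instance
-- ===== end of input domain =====

-- B replaces A's two passes (sums list + max + rescan) by one max(key=...) selection pass; same cost, more idiomatic.

-- ===== PORT A =====
-- second Python loop: scan for the first pt with sum(pt[0]) == maxVal and return pt[0]; trailing 'return None'
-- pt[0] is ported as pyGetD pt 0 [] (exact under Pre_, which requires every pt nonempty)
def getLowerRightFind (maxVal : Int) : List (List (List Int)) → Option (List Int)
  | [] => none
  | pt :: rest =>
    if (PySem.List.pyGetD pt 0 []).sum = maxVal then some (PySem.List.pyGetD pt 0 [])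
    else getLowerRightFind maxVal rest

def getLowerRight (cont : List (List (List Int))) : Option (List Int) :=
  let sums := cont.map (fun pt => (PySem.List.pyGetD pt 0 []).sum)
  match PySem.List.max? sums (fun x => x) with   -- the none branch (max raised ValueError) is outside Pre_
  | none => none
  | some maxVal => getLowerRightFind maxVal cont

-- ===== PORT B =====
def getLowerRight_alt (cont : List (List (List Int))) : Option (List Int) :=
  (PySem.List.max? cont (fun pt => (PySem.List.pyGetD pt 0 []).sum)).map
    (fun pt => PySem.List.pyGetD pt 0 [])

-- ===== PRECONDITION & SPEC =====
-- Pre_ excludes exactly the inputs where Python A raises: an empty contour list (max raises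
-- ValueError there) and any point pt with no coordinate rows (pt[0] raises IndexError).
def Pre_getLowerRight (cont : List (List (List Int))) : Prop :=
  cont ≠ [] ∧ ∀ pt ∈ cont, pt ≠ []
instance (cont : List (List (List Int))) : Decidable (Pre_getLowerRight cont) := by
  unfold Pre_getLowerRight; infer_instance
def pvWitness_getLowerRight : List (List (List Int)) := [[[1, 2]], [[3, 4]]]

def Spec_getLowerRight (cont : List (List (List Int))) (out : Option (List Int)) : Prop := out = getLowerRight_alt cont
instance (cont : List (List (List Int))) (out : Option (List Int)) : Decidable (Spec_getLowerRight cont out) := by unfold Spec_getLowerRight; infer_instance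

-- ===== CLAIM (what is proved, stated in full; the proofs are below) =====
def Claim_equal_getLowerRight : Prop := ∀ (cont : List (List (List Int))), Dom_getLowerRight cont → Pre_getLowerRight cont → Spec_getLowerRight cont (getLowerRight cont)

-- ===== LEMMAS AND PROOFS =====

-- the key function sum(pt[0]) and the running first-maximum of A's data
def pvKey (pt : List (List Int)) : Int := (PySem.List.pyGetD pt 0 []).sum

def pvMaxFrom (x : List (List Int)) : List (List (List Int)) → List (List Int)
  | [] => x
  | y :: t => pvMaxFrom (if pvKey x < pvKey y then y else x) t

theorem pvMax?_eq : ∀ (t : List (List (List Int))) (x : List (List Int)),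
    PySem.List.max? (x :: t) pvKey = some (pvMaxFrom x t) := by
  intro t
  induction t with
  | nil => intro x; simp [PySem.List.max?, pvMaxFrom]
  | cons y t ih =>
    intro x
    have h1 : PySem.List.max? (x :: y :: t) pvKey
        = PySem.List.max? ((if pvKey x < pvKey y then y else x) :: t) pvKey := by
      simp only [PySem.List.max?, List.foldl_cons]
      by_cases h : pvKey x < pvKey y <;> simp [h]
    rw [h1, ih, pvMaxFrom]

theorem pvMaxFrom_key (t : List (List (List Int))) : ∀ x,
    List.foldl max (pvKey x) (t.map pvKey) = pvKey (pvMaxFrom x t) := by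
  induction t with
  | nil => intro x; simp [pvMaxFrom]
  | cons y t ih =>
    intro x
    simp only [List.map_cons, List.foldl_cons, pvMaxFrom]
    rw [← ih]
    by_cases h : pvKey x < pvKey y
    · simp [h, max_eq_right (le_of_lt h)]
    · simp [h, max_eq_left (not_lt.mp h)]

theorem pvKey_le_maxFrom (t : List (List (List Int))) : ∀ x,
    pvKey x ≤ pvKey (pvMaxFrom x t) := by
  induction t with
  | nil => intro x; simp [pvMaxFrom]
  | cons y t ih =>
    intro x
    simp only [pvMaxFrom]
    by_cases h : pvKey x < pvKey y
    · simp only [h, if_pos]; exact le_of_lt (lt_of_lt_of_le h (ih y))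
    · simp only [h, if_neg, not_false_iff]; exact ih x

theorem pvMaxFrom_eq_self (t : List (List (List Int))) : ∀ x,
    pvKey (pvMaxFrom x t) = pvKey x → pvMaxFrom x t = x := by
  induction t with
  | nil => intro x _; rfl
  | cons y t ih =>
    intro x h
    simp only [pvMaxFrom] at h ⊢
    by_cases hxy : pvKey x < pvKey y
    · exfalso
      rw [if_pos hxy] at h
      have := pvKey_le_maxFrom t y
      omega
    · rw [if_neg hxy] at h ⊢
      exact ih x h

-- A's rescan finds exactly the first maximum, i.e. pvMaxFrom
theorem pvFind_eq (t : List (List (List Int))) : ∀ x,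
    getLowerRightFind (pvKey (pvMaxFrom x t)) (x :: t)
      = some (PySem.List.pyGetD (pvMaxFrom x t) 0 []) := by
  induction t with
  | nil => intro x; simp [getLowerRightFind, pvMaxFrom, pvKey]
  | cons y t ih =>
    intro x
    simp only [pvMaxFrom]
    by_cases hxy : pvKey x < pvKey y
    · rw [if_pos hxy]
      have hlt : pvKey x < pvKey (pvMaxFrom y t) := lt_of_lt_of_le hxy (pvKey_le_maxFrom t y)
      have hne : ¬ ((PySem.List.pyGetD x 0 []).sum = pvKey (pvMaxFrom y t)) := by
        simpa [pvKey] using ne_of_lt hlt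
      simp only [getLowerRightFind, if_neg hne]
      exact ih y
    · rw [if_neg hxy]
      by_cases hx : pvKey (pvMaxFrom x t) = pvKey x
      · have hself := pvMaxFrom_eq_self t x hx
        simp [getLowerRightFind, hself, pvKey]
      · have hlt : pvKey x < pvKey (pvMaxFrom x t) :=
          lt_of_le_of_ne (pvKey_le_maxFrom t x) (fun h => hx h.symm)
        have hnex : ¬ ((PySem.List.pyGetD x 0 []).sum = pvKey (pvMaxFrom x t)) := by
          simpa [pvKey] using ne_of_lt hlt
        have hney : ¬ ((PySem.List.pyGetD y 0 []).sum = pvKey (pvMaxFrom x t)) := by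
          have : pvKey y ≤ pvKey x := not_lt.mp hxy
          have : pvKey y < pvKey (pvMaxFrom x t) := lt_of_le_of_lt this hlt
          simpa [pvKey] using ne_of_lt this
        have htail := ih x
        simp only [getLowerRightFind, if_neg hnex] at htail
        simp only [getLowerRightFind, if_neg hnex, if_neg hney]
        exact htail

-- ===== VERDICT (by name: the statement is the Claim_ definition above) =====
theorem getLowerRight_spec : Claim_equal_getLowerRight := by
  unfold Claim_equal_getLowerRight
  intro cont _ _
  unfold Spec_getLowerRight
  cases cont with
  | nil => simp [getLowerRight, getLowerRight_alt, PySem.List.max?]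
  | cons x t =>
    show (match PySem.List.max? ((x :: t).map (fun pt => (PySem.List.pyGetD pt 0 []).sum)) (fun x => x) with
          | none => none
          | some maxVal => getLowerRightFind maxVal (x :: t))
        = (PySem.List.max? (x :: t) (fun pt => (PySem.List.pyGetD pt 0 []).sum)).map
            (fun pt => PySem.List.pyGetD pt 0 [])
    have hk : (fun pt : List (List Int) => (PySem.List.pyGetD pt 0 []).sum) = pvKey := rfl
    rw [hk, pvMax?_eq, List.map_cons, PySem.List.max?_id_cons, pvMaxFrom_key]
    simpa using pvFind_eq t x
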